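-- pv_equiv track=rewrite | github.com/pypi-data/pypi-mirror-275 | packages/m3u8-XZ/m3u8_xz-0.0.14.tar.gz/m3u8_xz-0.0.14/m3u8_XZ/xz.py | get_full_ts_url
-- ===== SOURCE A (Python) =====
-- def get_full_ts_url(url, ts_name: str):
--     # 直接返回http地址
--     if ts_name.startswith("http"):
--         return ts_name
--     # 需要拼接完整url地址
--     # 分割ts name
--     tl = ts_name.split('/')
--     #
--     new_url = []
--     # 循环url，去掉ts name中重复的部分
--     for s in url.split('/')[:-1]:
--         if s in tl:
--             tl.remove(s)
--         new_url.append(s)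
--     # 拼接ts name
--     new_url.extend(tl)
--     result = '/'.join(new_url)
--     # 返回
--     return result
-- ===== SOURCE B (Python) =====
-- def get_full_ts_url(url, ts_name: str):
--     if ts_name.startswith("http"):
--         return ts_name
--     prefix = url.split('/')[:-1]
--     # count table of the prefix segments, built once
--     counts = {}
--     for s in prefix:
--         counts[s] = counts.get(s, 0) + 1
--     # single filtering pass over the ts segments
--     kept = []
--     for seg in ts_name.split('/'):
--         if counts.get(seg, 0) > 0:
--             counts[seg] = counts.get(seg, 0) - 1
--         else:
--             kept.append(seg)
--     return '/'.join(prefix + kept)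
-- ===== Notes on version B (the rewrite author's own statement) =====
-- stated objective: faster
-- what changed: Replaces the per-prefix-segment membership test and in-place first-occurrence removal from the ts list with a count table of the prefix built once followed by a single filtering pass over the ts segments.
import Mathlib
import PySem

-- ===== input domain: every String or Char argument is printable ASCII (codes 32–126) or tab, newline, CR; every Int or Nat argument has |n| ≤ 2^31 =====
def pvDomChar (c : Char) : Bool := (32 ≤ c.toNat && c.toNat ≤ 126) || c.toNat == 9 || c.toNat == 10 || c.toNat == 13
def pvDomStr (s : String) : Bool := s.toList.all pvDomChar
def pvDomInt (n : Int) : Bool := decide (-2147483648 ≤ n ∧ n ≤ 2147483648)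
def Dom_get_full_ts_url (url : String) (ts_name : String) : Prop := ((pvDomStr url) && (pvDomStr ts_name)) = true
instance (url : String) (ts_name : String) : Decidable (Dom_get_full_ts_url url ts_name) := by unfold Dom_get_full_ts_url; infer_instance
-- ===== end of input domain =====

-- B replaces A's per-prefix membership test + in-place first-occurrence removal with a count
-- table of the prefix built once and a single filtering pass over the ts segments (faster).


-- ===== PORT A =====
def get_full_ts_url (url : String) (ts_name : String) : String :=
  if PySem.Str.startswith ts_name "http" then ts_name
  else
    let tl := (PySem.Str.split? ts_name "/").getD []   -- sep "/" ≠ "": split? is some here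
    let st := (PySem.List.slice ((PySem.Str.split? url "/").getD []) none (some (-1))).foldl
      (fun (st : List String × List String) s =>
        ( if st.1.contains s then (PySem.List.remove? st.1 s).getD st.1 else st.1,
          st.2 ++ [s] ))
      (tl, ([] : List String))
    PySem.Str.join "/" (st.2 ++ st.1)

-- ===== PORT B =====
def get_full_ts_url_alt (url : String) (ts_name : String) : String :=
  if PySem.Str.startswith ts_name "http" then ts_name
  else
    let pref := PySem.List.slice ((PySem.Str.split? url "/").getD []) none (some (-1))
    let counts : PySem.Dict String Int :=
      pref.foldl (fun d s => d.modify s 0 (· + 1)) PySem.Dict.empty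
    let st := ((PySem.Str.split? ts_name "/").getD []).foldl
      (fun (st : PySem.Dict String Int × List String) seg =>
        if 0 < st.1.getD seg 0 then (st.1.insert seg (st.1.getD seg 0 - 1), st.2)
        else (st.1, st.2 ++ [seg]))
      (counts, ([] : List String))
    PySem.Str.join "/" (pref ++ st.2)

-- ===== PRECONDITION & SPEC =====
def Spec_get_full_ts_url (url : String) (ts_name : String) (out : String) : Prop := out = get_full_ts_url_alt url ts_name
instance (url : String) (ts_name : String) (out : String) : Decidable (Spec_get_full_ts_url url ts_name out) := by unfold Spec_get_full_ts_url; infer_instance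

-- ===== CLAIM (what is proved, stated in full; the proofs are below) =====
def Claim_equal_get_full_ts_url : Prop := ∀ (url : String) (ts_name : String), Dom_get_full_ts_url url ts_name → Spec_get_full_ts_url url ts_name (get_full_ts_url url ts_name)

-- ===== LEMMAS AND PROOFS =====

-- count-driven filter: drop the first (c v) occurrences of each value v, keep the rest
def pvF (c : String → Int) : List String → List String
  | [] => []
  | x :: xs => if 0 < c x then pvF (fun v => if v = x then c v - 1 else c v) xs
               else x :: pvF c xs

-- A's tl-shrinking step
def pvStep (tl : List String) (s : String) : List String :=
  if tl.contains s then (PySem.List.remove? tl s).getD tl else tl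

theorem pvF_congr (c c' : String → Int) (tl : List String) (h : ∀ v, c v = c' v) :
    pvF c tl = pvF c' tl := by
  have : c = c' := funext h
  rw [this]

theorem pvStep_cons_ne (x s : String) (xs : List String) (h : x ≠ s) :
    pvStep (x :: xs) s = x :: pvStep xs s := by
  unfold pvStep
  rw [PySem.List.remove?_cons_of_ne xs h]
  by_cases hc : s ∈ xs
  · rcases Option.ne_none_iff_exists'.mp
      (fun hn => ((PySem.List.remove?_eq_none_iff xs s).mp hn) hc) with ⟨t, ht⟩
    simp [hc, ht, Ne.symm h]
  · simp [hc, Ne.symm h]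

theorem pvA_fold_eq (ps : List String) (tl acc : List String) :
    ps.foldl (fun (st : List String × List String) s =>
        ( if st.1.contains s then (PySem.List.remove? st.1 s).getD st.1 else st.1,
          st.2 ++ [s] )) (tl, acc)
      = (ps.foldl pvStep tl, acc ++ ps) := by
  induction ps generalizing tl acc with
  | nil => simp
  | cons p ps ih =>
    rw [List.foldl_cons, List.foldl_cons, ih]
    simp [pvStep]

theorem pvF_zero (c : String → Int) (tl : List String) (h : ∀ v, c v ≤ 0) :
    pvF c tl = tl := by
  induction tl with
  | nil => rfl
  | cons x xs ih => simp [pvF, not_lt.mpr (h x), ih]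

theorem pvF_incr (tl : List String) (c : String → Int) (p : String) (hp : 0 ≤ c p) :
    pvF (fun v => if v = p then c v + 1 else c v) tl = pvF c (pvStep tl p) := by
  induction tl generalizing c with
  | nil => simp [pvStep, pvF]
  | cons x xs ih =>
    by_cases hx : x = p
    · subst hx
      have hstep : pvStep (x :: xs) x = xs := by simp [pvStep]
      have h1 : (0:Int) < c x + 1 := by omega
      rw [hstep]
      simp only [pvF]
      rw [if_pos (by simpa using h1)]
      exact pvF_congr _ _ _ (fun v => by by_cases hv : v = x <;> simp [hv])
    · rw [pvStep_cons_ne x p xs hx]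
      simp only [pvF, if_neg hx]
      by_cases hcx : 0 < c x
      · rw [if_pos (by simpa [hx] using hcx), if_pos hcx]
        have hnp : ¬ p = x := fun hh => hx hh.symm
        have hp' : 0 ≤ (fun v => if v = x then c v - 1 else c v) p := by
          show 0 ≤ if p = x then c p - 1 else c p
          rw [if_neg hnp]
          exact hp
        rw [pvF_congr
            (fun v => if v = x then (if v = p then c v + 1 else c v) - 1
              else (if v = p then c v + 1 else c v))
            (fun v => if v = p then (if v = x then c v - 1 else c v) + 1
              else (if v = x then c v - 1 else c v)) xs
            (fun v => by
              by_cases h1 : v = x <;> by_cases h2 : v = p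
              · exact absurd (h1.symm.trans h2) hx
              all_goals simp [h1, h2, hx, hnp])]
        exact ih _ hp'
      · rw [if_neg (by simpa [hx] using hcx), if_neg hcx, ih c hp]

theorem pvA_resid_eq_pvF (ps : List String) (tl : List String) :
    ps.foldl pvStep tl = pvF (fun v => (ps.count v : Int)) tl := by
  induction ps generalizing tl with
  | nil =>
    simp only [List.foldl_nil]
    exact (pvF_zero _ tl (fun v => by simp)).symm
  | cons p ps ih =>
    rw [List.foldl_cons, ih (pvStep tl p),
      ← pvF_incr tl (fun v => (ps.count v : Int)) p (by positivity)]
    exact pvF_congr _ _ _ (fun v => by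
      by_cases h : v = p
      · subst h
        simp
      · have hb : (p == v) = false := beq_eq_false_iff_ne.mpr (fun hh => h hh.symm)
        simp [List.count_cons, hb, h])

theorem pvB_fold_eq (tl : List String) (d : PySem.Dict String Int) (acc : List String) :
    (tl.foldl (fun (st : PySem.Dict String Int × List String) seg =>
        if 0 < st.1.getD seg 0 then (st.1.insert seg (st.1.getD seg 0 - 1), st.2)
        else (st.1, st.2 ++ [seg])) (d, acc)).2
      = acc ++ pvF (fun v => d.getD v 0) tl := by
  induction tl generalizing d acc with
  | nil => simp [pvF]
  | cons x xs ih =>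
    by_cases hx : 0 < d.getD x 0
    · rw [List.foldl_cons, if_pos hx, ih]
      simp only [pvF, if_pos hx]
      congr 1
      exact pvF_congr _ _ _ (fun v => by
        rw [PySem.Dict.getD_insert]
        by_cases h : v = x <;> simp [h])
    · rw [List.foldl_cons, if_neg hx, ih]
      simp only [pvF, if_neg hx, List.append_assoc, List.singleton_append]

theorem pvCounts_eq (ps : List String) (v : String) :
    (ps.foldl (fun d s => d.modify s 0 (· + 1))
        (PySem.Dict.empty : PySem.Dict String Int)).getD v 0 = (ps.count v : Int) := by
  rw [PySem.Dict.getD_foldl_modify_add_one, PySem.Dict.getD_empty]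
  simp

-- ===== VERDICT (by name: the statement is the Claim_ definition above) =====
theorem get_full_ts_url_spec : Claim_equal_get_full_ts_url := by
  intro url ts_name _
  unfold Spec_get_full_ts_url
  simp only [get_full_ts_url, get_full_ts_url_alt]
  by_cases h : PySem.Str.startswith ts_name "http" = true
  · rw [if_pos h, if_pos h]
  · rw [if_neg h, if_neg h, pvA_fold_eq, pvB_fold_eq, pvA_resid_eq_pvF]
    simp only [List.nil_append, pvCounts_eq]
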